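-- pv_equiv track=rewrite | github.com/soham10/Non-Linear-Dynamics | Kaprekar.py | kmap
-- ===== SOURCE A (Python) =====
-- def kmap(x,n):
--     digits = [(x // 10**(n-i-1)) % 10 for i in range(0,n)]
--
--     digits.sort()
--     min_num = 0
--     for i in range(n):
--         min_num = min_num + digits[i] * (10**(n-i-1))
--
--     digits.reverse()
--     max_num = 0
--     for i in range(n):
--         max_num = max_num + digits[i] * (10**(n-i-1))
--
--     return max_num - min_num
-- ===== SOURCE B (Python) =====
-- def kmap(x, n):
--     counts = [0] * 10
--     for i in range(n):
--         counts[(x // 10**(n-i-1)) % 10] += 1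
--     max_num = 0
--     for d in range(9, -1, -1):
--         for _ in range(counts[d]):
--             max_num = max_num * 10 + d
--     min_num = 0
--     for d in range(10):
--         for _ in range(counts[d]):
--             min_num = min_num * 10 + d
--     return max_num - min_num
-- ===== Notes on version B (the rewrite author's own statement) =====
-- stated objective: alternative
-- what changed: Replaces the comparison sort plus reverse plus two positional power-weighted build loops by a 10-bucket digit frequency table (counting sort): digits are tallied once, then max_num and min_num are built by Horner accumulation while sweeping the digit values 9..0 and 0..9.
import Mathlib
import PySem

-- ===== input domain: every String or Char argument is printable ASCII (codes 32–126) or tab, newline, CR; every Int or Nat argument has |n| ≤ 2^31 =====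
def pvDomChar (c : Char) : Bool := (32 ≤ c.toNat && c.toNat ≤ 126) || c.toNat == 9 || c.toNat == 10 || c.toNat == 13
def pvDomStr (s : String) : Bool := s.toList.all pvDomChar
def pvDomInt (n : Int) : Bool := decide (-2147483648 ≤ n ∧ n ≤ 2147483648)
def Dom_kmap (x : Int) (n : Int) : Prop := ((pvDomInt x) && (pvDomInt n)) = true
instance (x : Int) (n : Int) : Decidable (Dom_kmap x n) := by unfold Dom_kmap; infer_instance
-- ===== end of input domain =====

-- B replaces the sort/reverse/positional-power loops of A by a 10-bucket digit
-- frequency table with Horner accumulation (counting sort); same return value.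


-- ===== PORT A =====
-- the digit of x at position i (shared subexpression of both Pythons):
-- (x // 10**(n-i-1)) % 10 ; the exponent n-i-1 is ≥ 0 for every i that range(n)
-- yields, so `(n - i - 1).toNat` is exact there.
def kmapDigit (x : Int) (n : Int) (i : Int) : Int :=
  PySem.Int.mod (PySem.Int.floordiv x ((10 : Int) ^ (n - i - 1).toNat)) 10

def kmap (x : Int) (n : Int) : Int :=
  let digits := (PySem.List.pyRange 0 n 1).map (fun i => kmapDigit x n i)
  let digits1 := PySem.List.sorted digits (fun d => d) false
  let min_num := (PySem.List.pyRange 0 n 1).foldl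
    (fun acc i => acc + PySem.List.pyGetD digits1 i 0 * (10 : Int) ^ (n - i - 1).toNat) 0
  let digits2 := digits1.reverse
  let max_num := (PySem.List.pyRange 0 n 1).foldl
    (fun acc i => acc + PySem.List.pyGetD digits2 i 0 * (10 : Int) ^ (n - i - 1).toNat) 0
  max_num - min_num

-- ===== PORT B =====
def kmap_alt (x : Int) (n : Int) : Int :=
  let counts := (PySem.List.pyRange 0 n 1).foldl
    (fun c i =>
      let d := kmapDigit x n i
      PySem.List.pySetD c d (PySem.List.pyGetD c d 0 + 1))
    (List.replicate 10 (0 : Int))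
  let max_num := (PySem.List.pyRange 9 (-1) (-1)).foldl
    (fun acc d =>
      (PySem.List.pyRange 0 (PySem.List.pyGetD counts d 0) 1).foldl
        (fun a _ => a * 10 + d) acc) 0
  let min_num := (PySem.List.pyRange 0 10 1).foldl
    (fun acc d =>
      (PySem.List.pyRange 0 (PySem.List.pyGetD counts d 0) 1).foldl
        (fun a _ => a * 10 + d) acc) 0
  max_num - min_num

-- ===== PRECONDITION & SPEC =====
def Spec_kmap (x : Int) (n : Int) (out : Int) : Prop := out = kmap_alt x n
instance (x : Int) (n : Int) (out : Int) : Decidable (Spec_kmap x n out) := by unfold Spec_kmap; infer_instance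

-- ===== CLAIM (what is proved, stated in full; the proofs are below) =====
def Claim_equal_kmap : Prop := ∀ (x : Int) (n : Int), Dom_kmap x n → Spec_kmap x n (kmap x n)

-- ===== LEMMAS AND PROOFS =====

-- Horner step used by both analyses
def kHorner (l : List Int) (a : Int) : Int := l.foldl (fun a d => a * 10 + d) a

theorem kHorner_shift (t : List Int) (a : Int) :
    kHorner t a = a * 10 ^ t.length + kHorner t 0 := by
  induction t generalizing a with
  | nil => simp [kHorner]
  | cons d t ih =>
      show kHorner t (a * 10 + d) = _ + kHorner t (0 * 10 + d)
      rw [ih (a * 10 + d), ih (0 * 10 + d)]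
      simp [List.length_cons, pow_succ]
      ring

-- A's positional-sum loop (Nat-index form) computes the Horner value
theorem kPosLoop (t : List Int) (a : Int) :
    (List.range t.length).foldl
      (fun acc k => acc + t.getD k 0 * (10 : Int) ^ (t.length - k - 1)) a
    = a + kHorner t 0 := by
  induction t generalizing a with
  | nil => simp [kHorner]
  | cons d t ih =>
      rw [List.length_cons, List.range_succ_eq_map, List.foldl_cons, List.foldl_map]
      have he : ∀ (acc : Int), ∀ k ∈ List.range t.length,
          (fun acc k => acc + (d :: t).getD (Nat.succ k) 0 *
              (10 : Int) ^ (t.length + 1 - Nat.succ k - 1)) acc k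
          = (fun acc k => acc + t.getD k 0 * (10 : Int) ^ (t.length - k - 1)) acc k := by
        intro acc k _
        simp [Nat.succ_sub_succ]
      rw [PySem.List.foldl_congr_mem _ _ _ _ he, ih]
      have : kHorner (d :: t) 0 = kHorner t d := by simp [kHorner]
      rw [this, kHorner_shift t d, kHorner_shift t (0 : Int)]
      simp [List.getD]
      ring

-- A's Int-indexed loop over range(n) equals the Horner value of the indexed list
theorem kALoop (n : Int) (l : List Int) (hl : (l.length : Int) = n) :
    (PySem.List.pyRange 0 n 1).foldl
      (fun acc i => acc + PySem.List.pyGetD l i 0 * (10 : Int) ^ ((n - i - 1).toNat)) 0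
    = kHorner l 0 := by
  rw [PySem.List.pyRange_one, List.foldl_map]
  have hn : (n - 0).toNat = l.length := by omega
  rw [hn]
  have he : ∀ (acc : Int), ∀ k ∈ List.range l.length,
      (fun acc (k : Nat) => acc + PySem.List.pyGetD l ((0 : Int) + k) 0 *
          (10 : Int) ^ ((n - ((0 : Int) + k) - 1).toNat)) acc k
      = (fun acc (k : Nat) => acc + l.getD k 0 * (10 : Int) ^ (l.length - k - 1)) acc k := by
    intro acc k hk
    rw [List.mem_range] at hk
    simp only [zero_add, PySem.List.pyGetD_natCast]
    rw [show (n - (k : Int) - 1).toNat = l.length - k - 1 by omega]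
  rw [PySem.List.foldl_congr_mem _ _ _ _ he, kPosLoop]
  simp

-- B's counter update
def kupd (c : List Int) (d : Int) : List Int :=
  PySem.List.pySetD c d (PySem.List.pyGetD c d 0 + 1)

theorem kupd_length (c : List Int) (d : Int) (hd : 0 ≤ d) :
    (kupd c d).length = c.length := by
  simp [kupd, PySem.List.pySetD_of_nonneg _ _ hd]

theorem kcounts_length (l : List Int) (c : List Int) (hl : ∀ d ∈ l, 0 ≤ d) :
    (l.foldl kupd c).length = c.length := by
  induction l generalizing c with
  | nil => rfl
  | cons d t ih =>
      rw [List.foldl_cons, ih _ (fun e he => hl e (List.mem_cons_of_mem d he)),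
        kupd_length c d (hl d List.mem_cons_self)]

theorem kcounts_getD (l : List Int) (c : List Int)
    (hl : ∀ d ∈ l, 0 ≤ d ∧ d < 10) (hc : c.length = 10) (j : Nat) (hj : j < 10) :
    (l.foldl kupd c).getD j 0 = c.getD j 0 + l.count (j : Int) := by
  induction l generalizing c with
  | nil => simp
  | cons d t ih =>
      have hd := hl d List.mem_cons_self
      have hlen : (kupd c d).length = 10 := by rw [kupd_length c d hd.1, hc]
      rw [List.foldl_cons, ih _ (fun e he => hl e (List.mem_cons_of_mem d he)) hlen]
      have hdlt : d.toNat < c.length := by omega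
      have hset : kupd c d = c.set d.toNat (c.getD d.toNat 0 + 1) := by
        rw [kupd, PySem.List.pySetD_of_nonneg _ _ hd.1,
          PySem.List.pyGetD_eq_getElem c 0 hd.1 (by omega),
          List.getD_eq_getElem c 0 hdlt]
      rw [hset]
      have hjlt : j < c.length := by omega
      have hjset : j < (c.set d.toNat (c.getD d.toNat 0 + 1)).length := by
        rw [List.length_set]; omega
      rw [List.getD_eq_getElem _ 0 hjset, List.getElem_set,
        List.getD_eq_getElem c 0 hjlt, List.count_cons]
      by_cases hjd : d.toNat = j
      · rw [if_pos hjd, List.getD_eq_getElem c 0 hdlt]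
        simp only [hjd]
        have hbeq : (d == (j : Int)) = true := by simp; omega
        rw [hbeq]
        simp
        omega
      · have hd' : ¬ ((d == (j : Int)) = true) := by simp; omega
        rw [if_neg hjd, if_neg hd']
        simp

-- a fold with a body that ignores the element depends only on the length
theorem kfoldl_const {α : Type} (g : Int → Int) (l : List α) (a : Int) :
    l.foldl (fun a _ => g a) a = g^[l.length] a := by
  induction l generalizing a with
  | nil => rfl
  | cons d t ih => rw [List.foldl_cons, ih, List.length_cons,
      Function.iterate_succ_apply]

-- B's inner repetition loop = Horner over a replicate block
theorem kInner (m : Nat) (d a : Int) :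
    (PySem.List.pyRange 0 (m : Int) 1).foldl (fun a _ => a * 10 + d) a
    = kHorner (List.replicate m d) a := by
  have h1 : (PySem.List.pyRange 0 (m : Int) 1).foldl (fun a _ => a * 10 + d) a
      = (fun a => a * 10 + d)^[(PySem.List.pyRange 0 (m : Int) 1).length] a :=
    kfoldl_const _ _ a
  have h2 : kHorner (List.replicate m d) a
      = (fun a => a * 10 + d)^[m] a := by
    rw [kHorner]
    have hcg : (List.replicate m d).foldl (fun a x => a * 10 + x) a
        = (List.replicate m d).foldl (fun a _ => a * 10 + d) a := by
      apply PySem.List.foldl_congr_mem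
      intro acc x hx
      rw [List.eq_of_mem_replicate hx]
    rw [hcg, kfoldl_const, List.length_replicate]
  rw [h1, h2, PySem.List.pyRange_one]
  simp

-- composing block folds = fold over the flatMap
theorem kFlat (blk : Int → List Int) (js : List Int) (a : Int) :
    js.foldl (fun acc j => kHorner (blk j) acc) a
    = kHorner (js.flatMap blk) a := by
  induction js generalizing a with
  | nil => simp [kHorner]
  | cons j t ih =>
      rw [List.foldl_cons, ih, List.flatMap_cons]
      simp only [kHorner, List.foldl_append]

-- the ascending counting-sort list is sorted
theorem kPairwise (c : Int → Nat) (js : List Int) (hjs : js.Pairwise (· ≤ ·)) :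
    (js.flatMap (fun j => List.replicate (c j) j)).Pairwise (· ≤ ·) := by
  induction js with
  | nil => simp
  | cons j t ih =>
      rw [List.pairwise_cons] at hjs
      rw [List.flatMap_cons, List.pairwise_append]
      refine ⟨List.pairwise_replicate.mpr (Or.inr le_rfl), ih hjs.2, ?_⟩
      intro a ha b hb
      rw [List.eq_of_mem_replicate ha]
      obtain ⟨j', hj', hb'⟩ := List.mem_flatMap.mp hb
      rw [List.eq_of_mem_replicate hb']
      exact hjs.1 j' hj'

-- the ascending counting-sort list is a permutation of the digits
theorem kPerm (ds : List Int) (hds : ∀ d ∈ ds, 0 ≤ d ∧ d < 10) :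
    (([0,1,2,3,4,5,6,7,8,9] : List Int).flatMap
      (fun j => List.replicate (ds.count j) j)).Perm ds := by
  rw [List.perm_iff_count]
  intro a
  by_cases ha : 0 ≤ a ∧ a < 10
  · obtain ⟨h0, h1⟩ := ha
    interval_cases a <;>
      simp [List.count_append, List.count_replicate]
  · have hnot : a ∉ ds := fun hmem => ha (hds a hmem)
    rw [List.count_eq_zero.mpr hnot, List.count_eq_zero]
    intro hmem
    obtain ⟨j, hj, hmem'⟩ := List.mem_flatMap.mp hmem
    rw [List.eq_of_mem_replicate hmem'] at ha
    fin_cases hj <;> simp_all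

-- ===== VERDICT (by name: the statement is the Claim_ definition above) =====
theorem kmap_spec : Claim_equal_kmap := by
  intro x n _
  show kmap x n = kmap_alt x n
  simp only [kmap, kmap_alt]
  by_cases hn : n ≤ 0
  · rw [PySem.List.pyRange_one_eq_nil hn]
    simp only [List.map_nil, List.foldl_nil]
    decide
  · have hpos : 0 < n := by omega
    set ds : List Int := (PySem.List.pyRange 0 n 1).map (fun i => kmapDigit x n i)
      with hds_def
    have hlen : (ds.length : Int) = n := by
      simp [hds_def, PySem.List.pyRange_one]
      omega
    have hrange : ∀ d ∈ ds, 0 ≤ d ∧ d < 10 := by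
      intro d hd
      obtain ⟨i, _, rfl⟩ := List.mem_map.mp hd
      exact ⟨PySem.Int.mod_nonneg _ (by norm_num), PySem.Int.mod_lt _ (by norm_num)⟩
    have hcounts :
        (PySem.List.pyRange 0 n 1).foldl
          (fun c i =>
            let d := kmapDigit x n i
            PySem.List.pySetD c d (PySem.List.pyGetD c d 0 + 1))
          (List.replicate 10 (0 : Int))
        = ds.foldl kupd (List.replicate 10 (0 : Int)) := by
      rw [hds_def, List.foldl_map]
      rfl
    rw [hcounts]
    set cts := ds.foldl kupd (List.replicate 10 (0 : Int)) with hcts_def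
    have hclen : cts.length = 10 := by
      rw [hcts_def, kcounts_length ds _ (fun d hd => (hrange d hd).1)]
      simp
    have hcget : ∀ d : Int, 0 ≤ d → d < 10 →
        PySem.List.pyGetD cts d 0 = ((ds.count d : Nat) : Int) := by
      intro d h0 h1
      rw [PySem.List.pyGetD_eq_getElem cts 0 h0 (by omega),
        ← List.getD_eq_getElem cts 0 (by omega),
        hcts_def, kcounts_getD ds _ hrange (by simp) d.toNat (by omega),
        show ((d.toNat : Nat) : Int) = d from by omega]
      have hz : (List.replicate 10 (0 : Int)).getD d.toNat 0 = 0 := by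
        rw [List.getD_eq_getElem _ _ (by simp; omega)]
        simp only [List.getElem_replicate]
      rw [hz, zero_add]
    have h9 : PySem.List.pyRange 9 (-1) (-1) = [9,8,7,6,5,4,3,2,1,0] := by decide
    have h10 : PySem.List.pyRange 0 10 1 = [0,1,2,3,4,5,6,7,8,9] := by decide
    rw [h9, h10]
    have hmaxeq : ([9,8,7,6,5,4,3,2,1,0] : List Int).foldl
        (fun acc d => (PySem.List.pyRange 0 (PySem.List.pyGetD cts d 0) 1).foldl
          (fun a _ => a * 10 + d) acc) 0
        = kHorner (([9,8,7,6,5,4,3,2,1,0] : List Int).flatMap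
            (fun j => List.replicate (ds.count j) j)) 0 := by
      refine (PySem.List.foldl_congr_mem _ _ _ _ ?_).trans (kFlat _ _ 0)
      intro acc d hd
      have hb : 0 ≤ d ∧ d < 10 := by fin_cases hd <;> norm_num
      simp only [hcget d hb.1 hb.2]
      exact kInner (ds.count d) d acc
    have hmineq : ([0,1,2,3,4,5,6,7,8,9] : List Int).foldl
        (fun acc d => (PySem.List.pyRange 0 (PySem.List.pyGetD cts d 0) 1).foldl
          (fun a _ => a * 10 + d) acc) 0
        = kHorner (([0,1,2,3,4,5,6,7,8,9] : List Int).flatMap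
            (fun j => List.replicate (ds.count j) j)) 0 := by
      refine (PySem.List.foldl_congr_mem _ _ _ _ ?_).trans (kFlat _ _ 0)
      intro acc d hd
      have hb : 0 ≤ d ∧ d < 10 := by fin_cases hd <;> norm_num
      simp only [hcget d hb.1 hb.2]
      exact kInner (ds.count d) d acc
    rw [hmaxeq, hmineq]
    have hsortlen : ((PySem.List.sorted ds (fun d => d) false).length : Int) = n := by
      rw [PySem.List.length_sorted]; exact hlen
    have hrevlen : (((PySem.List.sorted ds (fun d => d) false).reverse).length : Int) = n := by
      rw [List.length_reverse]; exact hsortlen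
    rw [kALoop n ((PySem.List.sorted ds (fun d => d) false).reverse) hrevlen,
      kALoop n (PySem.List.sorted ds (fun d => d) false) hsortlen]
    have hsorted : PySem.List.sorted ds (fun d => d) false
        = ([0,1,2,3,4,5,6,7,8,9] : List Int).flatMap
            (fun j => List.replicate (ds.count j) j) :=
      PySem.List.sorted_id_eq_of_perm_of_pairwise _ _ (kPerm ds hrange)
        (kPairwise (fun j => ds.count j) _ (by decide))
    have hdesc : (([0,1,2,3,4,5,6,7,8,9] : List Int).flatMap
          (fun j => List.replicate (ds.count j) j)).reverse
        = ([9,8,7,6,5,4,3,2,1,0] : List Int).flatMap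
            (fun j => List.replicate (ds.count j) j) := by
      rw [List.reverse_flatMap]
      simp [Function.comp_def, List.reverse_replicate]
    rw [hsorted, hdesc]
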